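-- pv_equiv track=rewrite | github.com/Mao-69/untouchable_to_prime | vector_magnitude.py | find_joshie_pairs
-- ===== SOURCE A (Python) =====
-- import math
--
-- def phi(n):
--     result = n
--     p = 2
--     while p * p <= n:
--         if n % p == 0:
--             while n % p == 0:
--                 n //= p
--             result -= result // p
--         p += 1
--     if n > 1:
--         result -= result // n
--     return result
--
-- def single_digit_sum(num):
--     while num >= 10:
--         num = sum(int(digit) for digit in str(num))
--     return num
--
-- def is_prime(num):
--     if num < 2:
--         return False
--     for i in range(2, int(math.sqrt(num)) + 1):
--         if num % i == 0:
--             return False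
--     return True
--
-- def find_joshie_pairs(untouchables):
--     joshie_pairs = {}
--     for n in untouchables:
--         phi_n = phi(n)
--         digit_sum = single_digit_sum(phi_n)
--         mu = 2 if digit_sum >= 5 else 4
--         j_n = (phi_n // mu) + 1
--
--         if is_prime(j_n):
--             key = (phi_n, digit_sum, j_n)
--             if key not in joshie_pairs:
--                 joshie_pairs[key] = []
--             joshie_pairs[key].append(n)
--
--     return {k: v for k, v in joshie_pairs.items() if len(v) > 1}
-- ===== SOURCE B (Python) =====
-- # B: grouping by repeated scan-and-remove partition of a flat entry list (no dict
-- # accumulation): take the first key, gather all its members in one scan, keep the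
-- # group iff it has >1 member, drop that key and repeat ("alternative", no speed claim).
-- import math
--
-- def phi(n):
--     result = n
--     p = 2
--     while p * p <= n:
--         if n % p == 0:
--             while n % p == 0:
--                 n //= p
--             result -= result // p
--         p += 1
--     if n > 1:
--         result -= result // n
--     return result
--
-- def single_digit_sum(num):
--     while num >= 10:
--         num = sum(int(digit) for digit in str(num))
--     return num
--
-- def is_prime(num):
--     if num < 2:
--         return False
--     for i in range(2, int(math.sqrt(num)) + 1):
--         if num % i == 0:
--             return False
--     return True
--
-- def find_joshie_pairs(untouchables):
--     entries = []
--     for n in untouchables: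
--         phi_n = phi(n)
--         digit_sum = single_digit_sum(phi_n)
--         mu = 2 if digit_sum >= 5 else 4
--         j_n = (phi_n // mu) + 1
--         if is_prime(j_n):
--             entries.append(((phi_n, digit_sum, j_n), n))
--     result = {}
--     while entries:
--         key = entries[0][0]
--         members = [n for k, n in entries if k == key]
--         if len(members) > 1:
--             result[key] = members
--         entries = [(k, n) for k, n in entries if k != key]
--     return result
-- ===== Notes on version B (the rewrite author's own statement) =====
-- stated objective: alternative
-- what changed: Replaces A's single-pass mutable-dict accumulation (conditional key creation + append per element, then a size filter over the items) with a scan-and-remove partition of a flat (key, n) entry list: repeatedly take the first remaining key, gather all its members in one linear scan, keep the group only if it has more than one member, delete that key's entries and repeat; no dict is used while grouping.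
import Mathlib
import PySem

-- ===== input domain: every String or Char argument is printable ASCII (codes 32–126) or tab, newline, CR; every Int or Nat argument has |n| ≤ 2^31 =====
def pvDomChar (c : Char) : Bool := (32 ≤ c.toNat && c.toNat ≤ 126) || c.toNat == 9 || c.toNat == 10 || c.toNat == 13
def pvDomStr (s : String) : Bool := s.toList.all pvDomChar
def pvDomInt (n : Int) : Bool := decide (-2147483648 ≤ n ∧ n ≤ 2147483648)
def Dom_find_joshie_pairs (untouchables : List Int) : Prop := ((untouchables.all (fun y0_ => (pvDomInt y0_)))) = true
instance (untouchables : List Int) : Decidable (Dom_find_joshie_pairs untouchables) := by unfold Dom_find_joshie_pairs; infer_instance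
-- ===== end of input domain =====

-- B replaces A's mutable-dict accumulation by a scan-and-remove partition of a flat
-- entry list: take the first key, gather its members in one scan, keep the group iff
-- it has more than one member, drop that key and repeat ("alternative", no speed claim).

-- ===== PORT A =====
-- Helpers phi / single_digit_sum / is_prime are IDENTICAL in A and B (B keeps them
-- unchanged), so they are defined once here and used by both ports.

-- inner 'while n % p == 0: n //= p' of phi; fuel = n.toNat + 1 iterations always suffices
-- (n is positive and strictly decreases on each division), so this is exact on every input.
def phiStrip (fuel : Nat) (n p : Int) : Int :=
  match fuel with
  | 0 => n
  | fuel + 1 =>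
    if PySem.Int.mod n p = 0 then phiStrip fuel (PySem.Int.floordiv n p) p else n

-- outer 'while p * p <= n' loop of phi; p grows by 1 each iteration and n never grows, so
-- fuel = n.toNat + 2 always suffices and the port is exact on every input.
def phiLoop (fuel : Nat) (n p result : Int) : Int :=
  match fuel with
  | 0 => result
  | fuel + 1 =>
    if p * p ≤ n then
      if PySem.Int.mod n p = 0 then
        let n' := phiStrip (n.toNat + 1) n p
        phiLoop fuel n' (p + 1) (result - PySem.Int.floordiv result p)
      else phiLoop fuel n (p + 1) result
    else
      if n > 1 then result - PySem.Int.floordiv result n else result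

def pyPhi (n : Int) : Int := phiLoop (n.toNat + 2) n 2 n

-- int(digit) for one decimal digit character of str(num); exact since it is only reached
-- with num ≥ 10, where every character of str(num) is '0'..'9'.
def digitVal (c : Char) : Int := (c.toNat : Int) - 48

-- 'while num >= 10: num = sum(int(d) for d in str(num))'; the digit sum of num ≥ 10 is
-- strictly smaller than num, so fuel = num.toNat + 1 iterations always suffice (exact).
def sdsLoop (fuel : Nat) (num : Int) : Int :=
  match fuel with
  | 0 => num
  | fuel + 1 =>
    if num ≥ 10 then
      sdsLoop fuel (((PySem.Int.toStr num).toList.map digitVal).sum)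
    else num

def singleDigitSum (num : Int) : Int := sdsLoop (num.toNat + 1) num

-- int(math.sqrt(num)) = Nat.sqrt num.toNat: exact for 0 ≤ num ≤ 2^31 (double sqrt rounds
-- to the same integer part there); the early return over the range is List.any.
def isPrime (num : Int) : Bool :=
  if num < 2 then false
  else !((PySem.List.pyRange 2 ((Nat.sqrt num.toNat : Int) + 1) 1).any
          (fun i => PySem.Int.mod num i == 0))

-- one iteration of A's accumulation loop
def joshieStep (d : PySem.Dict (Int × Int × Int) (List Int)) (n : Int) :
    PySem.Dict (Int × Int × Int) (List Int) :=
  let phi_n := pyPhi n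
  let digit_sum := singleDigitSum phi_n
  let mu : Int := if digit_sum ≥ 5 then 2 else 4
  let j_n := PySem.Int.floordiv phi_n mu + 1
  if isPrime j_n then
    let key := (phi_n, digit_sum, j_n)
    let d' := if d.contains key then d else d.insert key []
    d'.insert key (d'.getD key [] ++ [n])
  else d

def find_joshie_pairs (untouchables : List Int) : List (Int × Int × Int × List Int) :=
  let d := untouchables.foldl joshieStep PySem.Dict.empty
  ((d.items.filter (fun kv => kv.2.length > 1)).map
    (fun kv => (kv.1.1, kv.1.2.1, kv.1.2.2, kv.2)))

-- ===== PORT B =====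
-- the 'while entries:' scan-and-remove loop of Source B; terminates because the first
-- entry never survives its own key's filter, so the list strictly shrinks.
def partLoop : List ((Int × Int × Int) × Int) → PySem.Dict (Int × Int × Int) (List Int) →
    PySem.Dict (Int × Int × Int) (List Int)
  | [], result => result
  | (key, n) :: rest, result =>
    let entries := (key, n) :: rest
    let members := (entries.filter (fun p => p.1 == key)).map (·.2)
    let result' := if members.length > 1 then result.insert key members else result
    partLoop (entries.filter (fun p => !(p.1 == key))) result'
termination_by es _ => es.length
decreasing_by
  simp only [List.filter_cons, beq_self_eq_true, Bool.not_true, Bool.false_eq_true,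
    if_false]
  exact Nat.lt_succ_of_le (List.length_filter_le _ _)

def find_joshie_pairs_alt (untouchables : List Int) : List (Int × Int × Int × List Int) :=
  let entries := untouchables.foldl (fun acc n =>
    let phi_n := pyPhi n
    let digit_sum := singleDigitSum phi_n
    let mu : Int := if digit_sum ≥ 5 then 2 else 4
    let j_n := PySem.Int.floordiv phi_n mu + 1
    if isPrime j_n then acc ++ [((phi_n, digit_sum, j_n), n)] else acc) []
  (partLoop entries PySem.Dict.empty).items.map
    (fun kv => (kv.1.1, kv.1.2.1, kv.1.2.2, kv.2))

-- ===== PRECONDITION & SPEC =====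
def Spec_find_joshie_pairs (untouchables : List Int) (out : List (Int × Int × Int × List Int)) : Prop := out = find_joshie_pairs_alt untouchables
instance (untouchables : List Int) (out : List (Int × Int × Int × List Int)) : Decidable (Spec_find_joshie_pairs untouchables out) := by unfold Spec_find_joshie_pairs; infer_instance

-- ===== CLAIM (what is proved, stated in full; the proofs are below) =====
def Claim_equal_find_joshie_pairs : Prop := ∀ (untouchables : List Int), Dom_find_joshie_pairs untouchables → Spec_find_joshie_pairs untouchables (find_joshie_pairs untouchables)

-- ===== LEMMAS AND PROOFS =====

-- the per-element key of both programs (phi_n, digit_sum, j_n)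
def joshieKey (n : Int) : Int × Int × Int :=
  let phi_n := pyPhi n
  let digit_sum := singleDigitSum phi_n
  let mu : Int := if digit_sum ≥ 5 then 2 else 4
  (phi_n, digit_sum, PySem.Int.floordiv phi_n mu + 1)

-- proof-side skeleton of partLoop: the list of kept (key, members) groups
def gatherFiltered : List ((Int × Int × Int) × Int) → List ((Int × Int × Int) × List Int)
  | [] => []
  | (key, n) :: rest =>
    let entries := (key, n) :: rest
    let members := (entries.filter (fun p => p.1 == key)).map (·.2)
    (if members.length > 1 then [(key, members)] else []) ++
      gatherFiltered (entries.filter (fun p => !(p.1 == key)))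
termination_by es => es.length
decreasing_by
  simp only [List.filter_cons, beq_self_eq_true, Bool.not_true, Bool.false_eq_true,
    if_false]
  exact Nat.lt_succ_of_le (List.length_filter_le _ _)

theorem stepCore_eq (d : PySem.Dict (Int × Int × Int) (List Int)) (key : Int × Int × Int)
    (b : Bool) (n : Int) :
    (if b then
        (let d' := if d.contains key then d else d.insert key []
         d'.insert key (d'.getD key [] ++ [n]))
      else d)
    = (if b then d.modify key [] (· ++ [n]) else d) := by
  cases b
  · rfl
  · simp only [if_true]
    by_cases hc : d.contains key = true
    · simp only [hc, if_true]; rfl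
    · simp only [hc, if_false, Bool.false_eq_true]
      rw [PySem.Dict.insert_insert_self, PySem.Dict.getD_insert_self]
      show d.insert key [n] = d.insert key (d.getD key [] ++ [n])
      rw [PySem.Dict.getD_of_not_contains d [] (by simp [hc])]
      rfl

theorem joshieStep_eq (d : PySem.Dict (Int × Int × Int) (List Int)) (n : Int) :
    joshieStep d n =
      if isPrime (joshieKey n).2.2 then d.modify (joshieKey n) [] (· ++ [n]) else d := by
  exact stepCore_eq d (joshieKey n) (isPrime (joshieKey n).2.2) n

-- A's fold is a modify-fold over the flat entry list
theorem fold_eq (ns : List Int) (d : PySem.Dict (Int × Int × Int) (List Int)) :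
    ns.foldl joshieStep d =
      (ns.filterMap (fun n =>
        if isPrime (joshieKey n).2.2 then some (joshieKey n, n) else none)).foldl
        (fun d p => d.modify p.1 [] (· ++ [p.2])) d := by
  induction ns generalizing d with
  | nil => rfl
  | cons x xs ih =>
    simp only [List.foldl_cons, List.filterMap_cons]
    rw [joshieStep_eq]
    by_cases hp : isPrime (joshieKey x).2.2 = true
    · simp only [hp, if_true]
      simp only [List.foldl_cons]
      exact ih _
    · simp only [hp, Bool.false_eq_true, if_false]
      exact ih d

-- B's entry-building loop is the same filterMap
theorem foldl_append_ite {α β : Type} (c : β → Bool) (f : β → α) (l : List β) (acc : List α) :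
    l.foldl (fun acc b => if c b then acc ++ [f b] else acc) acc
      = acc ++ l.filterMap (fun b => if c b then some (f b) else none) := by
  induction l generalizing acc with
  | nil => simp
  | cons x xs ih =>
    simp only [List.foldl_cons, List.filterMap_cons]
    by_cases h : c x = true
    · simp only [h, if_true]
      rw [ih, List.append_assoc]
      rfl
    · simp only [h, Bool.false_eq_true, if_false]
      exact ih acc

-- A's grouped dict, tabulated: keys in first-occurrence order, members gathered by filter
theorem A_items_tab (entries : List ((Int × Int × Int) × Int)) :
    (entries.foldl (fun d p => d.modify p.1 [] (· ++ [p.2]))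
        (PySem.Dict.empty : PySem.Dict (Int × Int × Int) (List Int))).items
      = (PySem.Set.ofList (entries.map Prod.fst)).map
          (fun k => (k, (entries.filter (fun p => p.1 == k)).map (·.2))) := by
  have hnd : ((entries.foldl (fun d p => d.modify p.1 [] (· ++ [p.2]))
      (PySem.Dict.empty : PySem.Dict (Int × Int × Int) (List Int)))).keys.Nodup :=
    PySem.Dict.nodup_keys_foldl_modify_key _ Prod.fst [] (fun _ p v => v ++ [p.2]) _
      (by rw [PySem.Dict.keys_empty]; exact List.nodup_nil)
  rw [PySem.Dict.items_eq_map_keys _ hnd []]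
  rw [PySem.Dict.keys_foldl_modify_key _ Prod.fst [] (fun _ p v => v ++ [p.2])]
  rw [PySem.Dict.keys_empty, PySem.Set.update_nil_left]
  simp only [PySem.Dict.getD_foldl_modify_append, PySem.Dict.getD_empty, List.nil_append]

-- ----- Set.ofList over a cons, via foldl add -----
theorem foldl_add_filter {α : Type} [BEq α] [LawfulBEq α] (k : α) (l : List α) :
    ∀ (s : List α), k ∈ s →
      l.foldl PySem.Set.add s = (l.filter (fun x => !(x == k))).foldl PySem.Set.add s := by
  induction l with
  | nil => intro s _; rfl
  | cons x xs ih =>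
    intro s hk
    simp only [List.foldl_cons, List.filter_cons]
    by_cases hx : (x == k) = true
    · have hxk : x = k := eq_of_beq hx
      simp only [hx, Bool.not_true, Bool.false_eq_true, if_false]
      have : PySem.Set.add s x = s := by
        rw [PySem.Set.add_eq_ite, if_pos (hxk ▸ hk)]
      rw [this]
      exact ih s hk
    · simp only [hx, Bool.not_false, if_pos, List.foldl_cons]
      refine ih _ ?_
      rw [PySem.Set.add_eq_ite]
      by_cases hm : x ∈ s
      · rw [if_pos hm]; exact hk
      · rw [if_neg hm]; exact List.mem_append_left _ hk

theorem foldl_add_cons {α : Type} [BEq α] [LawfulBEq α] (k : α) (l : List α) :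
    ∀ (s : List α), (∀ x ∈ l, (x == k) = false) →
      l.foldl PySem.Set.add (k :: s) = k :: l.foldl PySem.Set.add s := by
  induction l with
  | nil => intro s _; rfl
  | cons x xs ih =>
    intro s h
    have hxk : x ≠ k := by
      have := h x (List.mem_cons_self ..)
      simp only [beq_eq_false_iff_ne, ne_eq] at this
      exact this
    simp only [List.foldl_cons]
    have hstep : PySem.Set.add (k :: s) x = k :: PySem.Set.add s x := by
      rw [PySem.Set.add_eq_ite, PySem.Set.add_eq_ite]
      by_cases hm : x ∈ s
      · rw [if_pos (List.mem_cons_of_mem _ hm), if_pos hm]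
      · rw [if_neg (by simp [hxk, hm]), if_neg hm]
        rfl
    rw [hstep]
    exact ih _ (fun y hy => h y (List.mem_cons_of_mem _ hy))

theorem ofList_cons_filter {α : Type} [BEq α] [LawfulBEq α] (k : α) (l : List α) :
    PySem.Set.ofList (k :: l) = k :: PySem.Set.ofList (l.filter (fun x => !(x == k))) := by
  rw [PySem.Set.ofList_eq_foldl, PySem.Set.ofList_eq_foldl]
  simp only [List.foldl_cons]
  have h0 : PySem.Set.add ([] : List α) k = [k] := by
    rw [PySem.Set.add_eq_ite, if_neg (List.not_mem_nil)]
    rfl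
  rw [h0]
  rw [foldl_add_filter k l [k] (List.mem_singleton.mpr rfl)]
  exact foldl_add_cons k _ [] (fun x hx => by
    have := List.mem_filter.mp hx
    simpa using this.2)

-- gathering a key k' ≠ key ignores the removal of key's entries
theorem filter_key_of_ne (rest : List ((Int × Int × Int) × Int)) (key k' : Int × Int × Int)
    (hne : k' ≠ key) :
    (rest.filter (fun p => !(p.1 == key))).filter (fun p => p.1 == k')
      = rest.filter (fun p => p.1 == k') := by
  rw [List.filter_filter]
  refine List.filter_congr (fun p _ => ?_)
  by_cases h : (p.1 == k') = true
  · have : p.1 = k' := eq_of_beq h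
    simp [this, hne]
  · simp only [Bool.not_eq_true] at h
    simp [h]

-- one unfolding step of gatherFiltered, with head filters reduced
theorem gf_cons (key : Int × Int × Int) (n : Int) (rest : List ((Int × Int × Int) × Int)) :
    gatherFiltered ((key, n) :: rest)
      = (if (n :: (rest.filter (fun p => p.1 == key)).map (·.2)).length > 1
          then [(key, n :: (rest.filter (fun p => p.1 == key)).map (·.2))] else [])
        ++ gatherFiltered (rest.filter (fun p => !(p.1 == key))) := by
  rw [gatherFiltered]
  simp only [List.filter_cons, beq_self_eq_true, Bool.not_true, Bool.false_eq_true,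
    if_true, if_false, List.map_cons]

-- one unfolding step of partLoop, with head filters reduced
theorem pl_cons (key : Int × Int × Int) (n : Int) (rest : List ((Int × Int × Int) × Int))
    (res : PySem.Dict (Int × Int × Int) (List Int)) :
    partLoop ((key, n) :: rest) res
      = partLoop (rest.filter (fun p => !(p.1 == key)))
          (if (n :: (rest.filter (fun p => p.1 == key)).map (·.2)).length > 1
            then res.insert key (n :: (rest.filter (fun p => p.1 == key)).map (·.2))
            else res) := by
  rw [partLoop]
  simp only [List.filter_cons, beq_self_eq_true, Bool.not_true, Bool.false_eq_true,
    if_true, if_false, List.map_cons]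

-- the partition skeleton computes exactly the tabulated, length-filtered groups
theorem gather_tab (es : List ((Int × Int × Int) × Int)) :
    gatherFiltered es
      = ((PySem.Set.ofList (es.map Prod.fst)).map
          (fun k => (k, (es.filter (fun p => p.1 == k)).map (·.2)))).filter
          (fun kv => kv.2.length > 1) := by
  induction es using gatherFiltered.induct with
  | case1 => simp [gatherFiltered]
  | case2 key n rest ents ih =>
    simp only [ents] at ih
    have hrest' : ((key, n) :: rest).filter (fun p => !(p.1 == key))
        = rest.filter (fun p => !(p.1 == key)) := by
      simp [List.filter_cons]
    rw [hrest'] at ih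
    rw [gf_cons]
    -- right-hand side: peel the head key off the set and the map
    have hmap : ((key, n) :: rest).map Prod.fst = key :: rest.map Prod.fst := rfl
    rw [hmap, ofList_cons_filter]
    have hfm : (rest.map Prod.fst).filter (fun x => !(x == key))
        = (rest.filter (fun p => !(p.1 == key))).map Prod.fst := by
      rw [List.filter_map]
      rfl
    rw [hfm, List.map_cons, List.filter_cons]
    have hhead : (((key, n) :: rest).filter (fun p => p.1 == key)).map (·.2)
        = n :: (rest.filter (fun p => p.1 == key)).map (·.2) := by
      simp [List.filter_cons]
    have htail :
        ((PySem.Set.ofList ((rest.filter (fun p => !(p.1 == key))).map Prod.fst)).map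
            (fun k => (k, (((key, n) :: rest).filter (fun p => p.1 == k)).map (·.2)))).filter
            (fun kv => kv.2.length > 1)
          = gatherFiltered (rest.filter (fun p => !(p.1 == key))) := by
      rw [ih]
      congr 1
      refine List.map_congr_left (fun k' hk' => ?_)
      have hk'mem : k' ∈ (rest.filter (fun p => !(p.1 == key))).map Prod.fst :=
        (PySem.Set.mem_ofList _ _).mp hk'
      obtain ⟨p, hp, hpk⟩ := List.mem_map.mp hk'mem
      have hne : k' ≠ key := by
        have := (List.mem_filter.mp hp).2
        simp only [Bool.not_eq_eq_eq_not, Bool.not_true, beq_eq_false_iff_ne, ne_eq] at this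
        rw [← hpk]
        exact this
      have hkf : (key == k') = false := beq_eq_false_iff_ne.mpr (fun h => hne h.symm)
      have hh : ((key, n) :: rest).filter (fun p => p.1 == k')
          = rest.filter (fun p => p.1 == k') := by
        simp [hkf]
      rw [hh, ← filter_key_of_ne rest key k' hne]
    rw [hhead, htail]
    by_cases hl : ((n :: (rest.filter (fun p => p.1 == key)).map (·.2)).length > 1)
    · simp only [hl, if_true, decide_true, List.cons_append, List.nil_append]
    · simp only [hl, if_false, List.nil_append, gt_iff_lt]
      rw [if_neg (by simpa using hl)]

-- the while-loop over a dict of fresh keys appends exactly the skeleton's groups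
theorem partLoop_items (es : List ((Int × Int × Int) × Int)) :
    ∀ (res : PySem.Dict (Int × Int × Int) (List Int)),
      (∀ p ∈ es, res.contains p.1 = false) →
      (partLoop es res).items = res.items ++ gatherFiltered es := by
  induction es using gatherFiltered.induct with
  | case1 => intro res _; simp [partLoop, gatherFiltered]
  | case2 key n rest ents ih =>
    intro res h
    simp only [ents] at ih
    have hrest' : ((key, n) :: rest).filter (fun p => !(p.1 == key))
        = rest.filter (fun p => !(p.1 == key)) := by
      simp [List.filter_cons]
    rw [hrest'] at ih
    rw [pl_cons, gf_cons]
    have hkey : res.contains key = false := h (key, n) (List.mem_cons_self ..)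
    set members := n :: (rest.filter (fun p => p.1 == key)).map (·.2) with hmem
    have hfresh : ∀ p ∈ rest.filter (fun p => !(p.1 == key)),
        (if members.length > 1 then res.insert key members else res).contains p.1 = false := by
      intro p hp
      have hpe := List.mem_filter.mp hp
      have hpk : (p.1 == key) = false := by
        have := hpe.2; simpa using this
      have hres : res.contains p.1 = false := h p (List.mem_cons_of_mem _ hpe.1)
      by_cases hl : members.length > 1
      · rw [if_pos hl, PySem.Dict.contains_insert, hpk, Bool.false_or]
        exact hres
      · rw [if_neg hl]
        exact hres
    rw [ih _ hfresh]
    by_cases hl : members.length > 1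
    · rw [if_pos hl, if_pos hl, PySem.Dict.items_insert_of_not_contains _ _ hkey,
        List.append_assoc]
    · rw [if_neg hl, if_neg hl, List.nil_append]

theorem ab_eq (us : List Int) : find_joshie_pairs us = find_joshie_pairs_alt us := by
  simp only [find_joshie_pairs, find_joshie_pairs_alt]
  rw [fold_eq]
  have hB : (us.foldl (fun acc n =>
      let phi_n := pyPhi n
      let digit_sum := singleDigitSum phi_n
      let mu : Int := if digit_sum ≥ 5 then 2 else 4
      let j_n := PySem.Int.floordiv phi_n mu + 1
      if isPrime j_n then acc ++ [((phi_n, digit_sum, j_n), n)] else acc)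
      ([] : List ((Int × Int × Int) × Int)))
      = us.filterMap (fun n =>
          if isPrime (joshieKey n).2.2 then some (joshieKey n, n) else none) := by
    show us.foldl (fun acc n =>
        if isPrime (joshieKey n).2.2 then acc ++ [(joshieKey n, n)] else acc) [] = _
    rw [foldl_append_ite (fun n => isPrime (joshieKey n).2.2) (fun n => (joshieKey n, n)) us []]
    rfl
  rw [hB]
  set entries := us.filterMap (fun n =>
    if isPrime (joshieKey n).2.2 then some (joshieKey n, n) else none)
  rw [partLoop_items entries PySem.Dict.empty
    (fun p _ => PySem.Dict.contains_empty p.1)]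
  rw [A_items_tab, gather_tab]
  rfl

-- ===== VERDICT (by name: the statement is the Claim_ definition above) =====
theorem find_joshie_pairs_spec : Claim_equal_find_joshie_pairs := by
  intro us _
  exact ab_eq us
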